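-- pv_equiv track=rewrite | github.com/phobicdotno/5050-PhobicClock-Python-simulation | 8x8matrix.py | should_highlight
-- ===== SOURCE A (Python) =====
-- text = "PHOBICTIKVARTFEMPÅGOVERQHALVDFEMFIRESEKSTOLVSJUXRXÅTTETTELLEVENI"
--
-- highlight_texts_ranges = [
--     ("PHOBIC", (0, 15)),  # Affects characters 0 to 15
--     ("PÅ", (16, 23)), # Affects characters 16 to 23
--     ("HALV", (24, 31)), # Affects characters 24 to 31
--     ("SJU", (28, 63))  # Affects characters 28 to 63
-- ]
--
-- def should_highlight(idx):
--     for highlight_text, (start, end) in highlight_texts_ranges: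
--         # Check if idx falls within the specified range for this highlight text
--         if start <= idx <= end:
--             # Check if any part of the highlight_text matches within its range
--             text_slice = text[start:end+1]  # +1 because end is inclusive in this context
--             if highlight_text in text_slice:
--                 # Calculate offset of highlight_text within the slice
--                 highlight_start_idx = text_slice.index(highlight_text)
--                 highlight_end_idx = highlight_start_idx + len(highlight_text) - 1
--                 # Check if current idx falls within the highlight_text span in its range
--                 if highlight_start_idx <= (idx - start) <= highlight_end_idx:
--                     return True
--     return False
-- ===== SOURCE B (Python) =====
-- text = "PHOBICTIKVARTFEMPÅGOVERQHALVDFEMFIRESEKSTOLVSJUXRXÅTTETTELLEVENI"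
--
-- highlight_texts_ranges = [
--     ("PHOBIC", (0, 15)),
--     ("PÅ", (16, 23)),
--     ("HALV", (24, 31)),
--     ("SJU", (28, 63))
-- ]
--
-- # Absolute highlight spans, computed once at module load.
-- _SPANS = []
-- for _ht, (_s, _e) in highlight_texts_ranges:
--     _lo = _s + text[_s:_e + 1].index(_ht)
--     _SPANS.append((_lo, _lo + len(_ht) - 1))
--
-- def should_highlight(idx):
--     return any(lo <= idx <= hi for lo, hi in _SPANS)
-- ===== Notes on version B (the rewrite author's own statement) =====
-- stated objective: alternative
-- what changed: Precomputes the absolute highlight spans once at module load (slice + index per entry, done once), so each call is just an interval-membership scan with no slicing, substring test or .index call.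
import Mathlib
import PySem

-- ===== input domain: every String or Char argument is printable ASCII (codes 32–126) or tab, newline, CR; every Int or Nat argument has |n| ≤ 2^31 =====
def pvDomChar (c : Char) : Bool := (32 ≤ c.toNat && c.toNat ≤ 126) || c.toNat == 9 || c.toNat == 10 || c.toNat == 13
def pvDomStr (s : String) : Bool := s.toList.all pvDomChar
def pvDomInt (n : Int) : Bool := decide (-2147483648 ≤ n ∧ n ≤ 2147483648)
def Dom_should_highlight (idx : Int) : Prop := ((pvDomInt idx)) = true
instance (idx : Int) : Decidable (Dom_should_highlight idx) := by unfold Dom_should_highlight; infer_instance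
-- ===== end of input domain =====

-- B precomputes the absolute highlight spans once; each call is a plain interval scan (no slicing / substring search per call).

-- ===== PORT A =====
def pvText : String := "PHOBICTIKVARTFEMPÅGOVERQHALVDFEMFIRESEKSTOLVSJUXRXÅTTETTELLEVENI"

def pvRanges : List (String × (Int × Int)) :=
  [("PHOBIC", (0, 15)), ("PÅ", (16, 23)), ("HALV", (24, 31)), ("SJU", (28, 63))]

def pvLoopA (idx : Int) : List (String × (Int × Int)) → Bool
  | [] => false
  | (ht, (s, e)) :: rest =>
    if s ≤ idx ∧ idx ≤ e then
      let text_slice := PySem.List.slice pvText.toList (some s) (some (e + 1))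
      if PySem.Chars.isIn ht.toList text_slice then
        let hs := PySem.Chars.find text_slice ht.toList
        let he := hs + PySem.Chars.len ht.toList - 1
        if hs ≤ idx - s ∧ idx - s ≤ he then true else pvLoopA idx rest
      else pvLoopA idx rest
    else pvLoopA idx rest

def should_highlight (idx : Int) : Bool := pvLoopA idx pvRanges

-- ===== PORT B =====
def pvSpans : List (Int × Int) :=
  pvRanges.foldl
    (fun acc p =>
      let lo := p.2.1 +
        PySem.Chars.find (PySem.List.slice pvText.toList (some p.2.1) (some (p.2.2 + 1))) p.1.toList
      acc ++ [(lo, lo + PySem.Chars.len p.1.toList - 1)])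
    []

def should_highlight_alt (idx : Int) : Bool :=
  pvSpans.any (fun p => decide (p.1 ≤ idx) && decide (idx ≤ p.2))

-- ===== PRECONDITION & SPEC =====
def Spec_should_highlight (idx : Int) (out : Bool) : Prop := out = should_highlight_alt idx
instance (idx : Int) (out : Bool) : Decidable (Spec_should_highlight idx out) := by unfold Spec_should_highlight; infer_instance

-- ===== CLAIM (what is proved, stated in full; the proofs are below) =====
def Claim_equal_should_highlight : Prop := ∀ (idx : Int), Dom_should_highlight idx → Spec_should_highlight idx (should_highlight idx)

-- ===== LEMMAS AND PROOFS =====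
theorem pvC1 : PySem.Chars.isIn "PHOBIC".toList (PySem.List.slice pvText.toList none (some 16)) = true := by decide
theorem pvC2 : PySem.Chars.isIn "PÅ".toList (PySem.List.slice pvText.toList (some 16) (some 24)) = true := by decide
theorem pvC3 : PySem.Chars.isIn "HALV".toList (PySem.List.slice pvText.toList (some 24) (some 32)) = true := by decide
theorem pvC4 : PySem.Chars.isIn "SJU".toList (PySem.List.slice pvText.toList (some 28) (some 64)) = true := by decide
theorem pvF1 : PySem.Chars.find (PySem.List.slice pvText.toList none (some 16)) "PHOBIC".toList = 0 := by decide
theorem pvF2 : PySem.Chars.find (PySem.List.slice pvText.toList (some 16) (some 24)) "PÅ".toList = 0 := by decide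
theorem pvF3 : PySem.Chars.find (PySem.List.slice pvText.toList (some 24) (some 32)) "HALV".toList = 0 := by decide
theorem pvF4 : PySem.Chars.find (PySem.List.slice pvText.toList (some 28) (some 64)) "SJU".toList = 16 := by decide
theorem pvL1 : "PHOBIC".length = 6 := by decide
theorem pvL2 : "PÅ".length = 2 := by decide
theorem pvL3 : "HALV".length = 4 := by decide
theorem pvL4 : "SJU".length = 3 := by decide

theorem pvSpans_eval : pvSpans = [(0, 5), (16, 17), (24, 27), (44, 46)] := by decide

theorem pvAlt_eval (idx : Int) :
    should_highlight_alt idx =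
      ((decide (0 ≤ idx) && decide (idx ≤ 5)) || (decide (16 ≤ idx) && decide (idx ≤ 17)) ||
       (decide (24 ≤ idx) && decide (idx ≤ 27)) || (decide (44 ≤ idx) && decide (idx ≤ 46))) := by
  simp [should_highlight_alt, pvSpans_eval, Bool.or_assoc]

theorem pvA_eval (idx : Int) :
    should_highlight idx =
      ((decide (0 ≤ idx) && decide (idx ≤ 5)) || (decide (16 ≤ idx) && decide (idx ≤ 17)) ||
       (decide (24 ≤ idx) && decide (idx ≤ 27)) || (decide (44 ≤ idx) && decide (idx ≤ 46))) := by
  simp only [should_highlight, pvRanges, pvLoopA]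
  norm_num [pvC1, pvC2, pvC3, pvC4, pvF1, pvF2, pvF3, pvF4, pvL1, pvL2, pvL3, pvL4]
  split_ifs <;> (refine Bool.eq_iff_iff.mpr ?_; simp only [Bool.or_eq_true, Bool.and_eq_true, decide_eq_true_eq]; omega)

-- ===== VERDICT (by name: the statement is the Claim_ definition above) =====
theorem should_highlight_spec : Claim_equal_should_highlight := by
  intro idx _
  unfold Spec_should_highlight
  rw [pvA_eval, pvAlt_eval]
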